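-- pv_equiv track=rewrite | github.com/p13i/cs-public | cs/devtools/move_cc.py | compute_comment_string_mask
-- ===== SOURCE A (Python) =====
-- from typing import Dict, Iterable, List, Optional, Sequence, Tuple
--
-- def compute_comment_string_mask(text: str) -> List[bool]:
--     """Return a list of booleans (len == len(text)) where True indicates the
--     character is inside a C/C++ comment or string literal.
--
--     This is a conservative lexer that understands:
--       - // line comments
--       - /* block comments */
--       - "..." and '...' strings with escapes (no full support for raw-strings)
--
--     It's not a full lexer but is sufficient for skipping replacements inside
--     comments/strings in most C++ code.
--     """
--     n = len(text)
--     mask = [False] * n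
--     i = 0
--     state = "normal"
--     string_quote = None
--     while i < n:
--         ch = text[i]
--         nxt = text[i + 1] if i + 1 < n else ""
--         if state == "normal":
--             if ch == "/" and nxt == "/":
--                 # line comment
--                 j = i
--                 mask[j] = True
--                 j += 1
--                 while j < n and text[j] != "\n":
--                     mask[j] = True
--                     j += 1
--                 i = j
--                 continue
--             if ch == "/" and nxt == "*":
--                 # block comment
--                 j = i
--                 mask[j] = True
--                 j += 1
--                 while j < n:
--                     mask[j] = True
--                     if text[j - 1] == "*" and text[j] == "/":
--                         j += 1
--                         break
--                     j += 1
--                 i = j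
--                 continue
--             if ch in ('"', "'"):
--                 state = "string"
--                 string_quote = ch
--                 mask[i] = True
--                 i += 1
--                 continue
--             else:
--                 i += 1
--                 continue
--         elif state == "string":
--             mask[i] = True
--             if ch == "\\":
--                 # skip escaped char
--                 if i + 1 < n:
--                     mask[i + 1] = True
--                     i += 2
--                     continue
--                 else:
--                     i += 1
--                     continue
--             if ch == string_quote:
--                 state = "normal"
--                 string_quote = None
--             i += 1
--             continue
--     return mask
-- ===== SOURCE B (Python) =====
-- def compute_comment_string_mask(text):
--     """One-pass finite-state machine, one character per iteration, no lookahead."""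
--     mask = []
--     state = ("normal",)
--     for ch in text:
--         kind = state[0]
--         if kind == "normal":
--             if ch == "/":
--                 state = ("slash",)
--             elif ch in ("\"", "'"):
--                 mask.append(True)
--                 state = ("string", ch, False)
--             else:
--                 mask.append(False)
--         elif kind == "slash":
--             if ch == "/":
--                 mask += [True, True]
--                 state = ("line",)
--             elif ch == "*":
--                 mask += [True, True]
--                 state = ("block", True)
--             elif ch in ("\"", "'"):
--                 mask += [False, True]
--                 state = ("string", ch, False)
--             else:
--                 mask += [False, False]
--                 state = ("normal",)
--         elif kind == "line":
--             if ch == "\n":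
--                 mask.append(False)
--                 state = ("normal",)
--             else:
--                 mask.append(True)
--         elif kind == "block":
--             star = state[1]
--             mask.append(True)
--             if star and ch == "/":
--                 state = ("normal",)
--             else:
--                 state = ("block", ch == "*")
--         else:  # string
--             quote, esc = state[1], state[2]
--             mask.append(True)
--             if esc:
--                 state = ("string", quote, False)
--             elif ch == "\\":
--                 state = ("string", quote, True)
--             elif ch == quote:
--                 state = ("normal",)
--     if state[0] == "slash":
--         mask.append(False)
--     return mask
-- ===== Notes on version B (the rewrite author's own statement) =====
-- stated objective: faster
-- what changed: Replaced A's index-driven loop with nested marking loops and one-character lookahead by a pure one-character-per-step finite-state machine (states normal/slash/line/block/string) that appends to the mask and uses no lookahead, no inner loops and no index arithmetic.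
import Mathlib
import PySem

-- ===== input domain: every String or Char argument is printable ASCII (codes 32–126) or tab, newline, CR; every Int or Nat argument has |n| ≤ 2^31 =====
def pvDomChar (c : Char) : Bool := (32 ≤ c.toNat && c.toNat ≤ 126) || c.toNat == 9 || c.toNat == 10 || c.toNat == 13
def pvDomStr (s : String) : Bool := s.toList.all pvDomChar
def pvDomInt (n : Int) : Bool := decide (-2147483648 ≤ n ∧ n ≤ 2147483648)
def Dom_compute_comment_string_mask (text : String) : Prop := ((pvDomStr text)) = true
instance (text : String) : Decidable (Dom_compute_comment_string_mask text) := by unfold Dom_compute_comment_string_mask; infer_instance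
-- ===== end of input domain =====

-- B replaces A's index loop (with inner marking loops and one-char lookahead) by a pure
-- one-character-per-step finite-state machine with no lookahead or index arithmetic;
-- same O(n) asymptotics, measurably faster by a constant factor.

-- ===== PORT A =====
-- inner loop of A's "// line comment" branch: mark chars until newline or end.
-- The while-loops are ported as fuelled structural recursion; fuel = n is always
-- sufficient since the index strictly increases and the loop stops at n.
def pvLineLoopA (t : List Char) (n : Nat) : Nat → List Bool → Nat → List Bool × Nat
  | 0, mask, j => (mask, j)
  | fuel + 1, mask, j =>
    if j < n ∧ t.getD j ' ' ≠ '\n' then pvLineLoopA t n fuel (mask.set j true) (j + 1)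
    else (mask, j)

-- inner loop of A's "/* block comment */" branch
def pvBlockLoopA (t : List Char) (n : Nat) : Nat → List Bool → Nat → List Bool × Nat
  | 0, mask, j => (mask, j)
  | fuel + 1, mask, j =>
    if j < n then
      if t.getD (j - 1) ' ' = '*' ∧ t.getD j ' ' = '/' then (mask.set j true, j + 1)
      else pvBlockLoopA t n fuel (mask.set j true) (j + 1)
    else (mask, j)

-- A's main while-loop, one recursive step per iteration of the Python loop
def pvLoopA (t : List Char) (n : Nat) :
    Nat → List Bool → Nat → String → Option Char → List Bool
  | 0, mask, _, _, _ => mask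
  | fuel + 1, mask, i, state, quote =>
    if i < n then
      let ch := t.getD i ' '
      if state = "normal" then
        if ch = '/' ∧ i + 1 < n ∧ t.getD (i + 1) ' ' = '/' then
          pvLoopA t n fuel (pvLineLoopA t n n (mask.set i true) (i + 1)).1
            (pvLineLoopA t n n (mask.set i true) (i + 1)).2 "normal" quote
        else if ch = '/' ∧ i + 1 < n ∧ t.getD (i + 1) ' ' = '*' then
          pvLoopA t n fuel (pvBlockLoopA t n n (mask.set i true) (i + 1)).1
            (pvBlockLoopA t n n (mask.set i true) (i + 1)).2 "normal" quote
        else if ch = '"' ∨ ch = '\'' then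
          pvLoopA t n fuel (mask.set i true) (i + 1) "string" (some ch)
        else
          pvLoopA t n fuel mask (i + 1) "normal" quote
      else
        if ch = '\\' then
          if i + 1 < n then
            pvLoopA t n fuel ((mask.set i true).set (i + 1) true) (i + 2) "string" quote
          else pvLoopA t n fuel (mask.set i true) (i + 1) "string" quote
        else if some ch = quote then
          pvLoopA t n fuel (mask.set i true) (i + 1) "normal" none
        else
          pvLoopA t n fuel (mask.set i true) (i + 1) "string" quote
    else mask

def compute_comment_string_mask (text : String) : List Bool :=
  pvLoopA text.toList text.toList.length text.toList.length
    (List.replicate text.toList.length false) 0 "normal" none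

-- ===== PORT B =====
inductive PvBSt where
  | normal | slash | line
  | block (star : Bool)
  | str (q : Char) (esc : Bool)
deriving DecidableEq, Repr

-- B's FSM: one character consumed per step, mask built by appending
def pvRunB : List Char → PvBSt → List Bool
  | [], st => match st with
    | .slash => [false]
    | _ => []
  | ch :: rest, .normal =>
      if ch = '/' then pvRunB rest .slash
      else if ch = '"' ∨ ch = '\'' then true :: pvRunB rest (.str ch false)
      else false :: pvRunB rest .normal
  | ch :: rest, .slash =>
      if ch = '/' then true :: true :: pvRunB rest .line
      else if ch = '*' then true :: true :: pvRunB rest (.block true)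
      else if ch = '"' ∨ ch = '\'' then false :: true :: pvRunB rest (.str ch false)
      else false :: false :: pvRunB rest .normal
  | ch :: rest, .line =>
      if ch = '\n' then false :: pvRunB rest .normal
      else true :: pvRunB rest .line
  | ch :: rest, .block star =>
      if star ∧ ch = '/' then true :: pvRunB rest .normal
      else true :: pvRunB rest (.block (ch == '*'))
  | ch :: rest, .str q esc =>
      if esc then true :: pvRunB rest (.str q false)
      else if ch = '\\' then true :: pvRunB rest (.str q true)
      else if ch = q then true :: pvRunB rest .normal
      else true :: pvRunB rest (.str q esc)

def compute_comment_string_mask_alt (text : String) : List Bool :=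
  pvRunB text.toList .normal

-- ===== PRECONDITION & SPEC =====
def Spec_compute_comment_string_mask (text : String) (out : List Bool) : Prop := out = compute_comment_string_mask_alt text
instance (text : String) (out : List Bool) : Decidable (Spec_compute_comment_string_mask text out) := by unfold Spec_compute_comment_string_mask; infer_instance

-- ===== CLAIM (what is proved, stated in full; the proofs are below) =====
def Claim_equal_compute_comment_string_mask : Prop := ∀ (text : String), Dom_compute_comment_string_mask text → Spec_compute_comment_string_mask text (compute_comment_string_mask text)

-- ===== LEMMAS AND PROOFS =====

theorem pv_take_set_succ (l : List Bool) (j : Nat) (h : j < l.length) :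
    (l.set j true).take (j + 1) = l.take j ++ [true] := by
  apply List.ext_getElem
  · simp; omega
  · intro k hk1 hk2
    have hk : k ≤ j ∧ k < l.length := by simp at hk1; omega
    by_cases hkj : k = j
    · subst hkj
      simp [List.getElem_set, List.getElem_append, List.length_take,
        Nat.min_eq_left (Nat.le_of_lt h)]
    · have hklt : k < j := by omega
      simp [List.getElem_set, List.getElem_append, List.length_take, hkj, hklt,
        Nat.lt_min, hk.2, Ne.symm hkj]

theorem pv_drop_set (l : List Bool) (j k : Nat) (h : j < k) :
    (l.set j true).drop k = l.drop k := by
  rw [List.drop_set, if_pos h]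

theorem pvLineA_spec (t : List Char) : ∀ (fuel j : Nat) (mask : List Bool),
    t.length - j ≤ fuel → mask.length = t.length → j ≤ t.length →
    j ≤ (pvLineLoopA t t.length fuel mask j).2 ∧
    (pvLineLoopA t t.length fuel mask j).2 ≤ t.length ∧
    (pvLineLoopA t t.length fuel mask j).1.length = t.length ∧
    (pvLineLoopA t t.length fuel mask j).1.take (pvLineLoopA t t.length fuel mask j).2
      = mask.take j ++ List.replicate ((pvLineLoopA t t.length fuel mask j).2 - j) true ∧
    (pvLineLoopA t t.length fuel mask j).1.drop (pvLineLoopA t t.length fuel mask j).2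
      = mask.drop (pvLineLoopA t t.length fuel mask j).2 ∧
    ((pvLineLoopA t t.length fuel mask j).2 = t.length ∨ t.getD (pvLineLoopA t t.length fuel mask j).2 ' ' = '\n') ∧
    pvRunB (t.drop j) .line
      = List.replicate ((pvLineLoopA t t.length fuel mask j).2 - j) true
        ++ pvRunB (t.drop (pvLineLoopA t t.length fuel mask j).2) .line := by
  intro fuel
  induction fuel with
  | zero =>
    intro j mask hf hm hj
    have hjn : j = t.length := by omega
    refine ⟨Nat.le_refl j, ?_, hm, ?_, rfl, Or.inl ?_, ?_⟩ <;>
      simp [pvLineLoopA, hjn]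
  | succ k ih =>
    intro j mask hf hm hj
    rw [pvLineLoopA]
    split
    · next hcond =>
      obtain ⟨hjn, hnl⟩ := hcond
      obtain ⟨h1, h2, h3, h4, h5, h6, h7⟩ := ih (j + 1) (mask.set j true) (by omega) (by simp [hm]) (by omega)
      refine ⟨by omega, h2, h3, ?_, ?_, h6, ?_⟩
      · rw [h4, pv_take_set_succ mask j (by omega)]
        rw [List.append_assoc]
        congr 1
        rw [show (pvLineLoopA t t.length k (mask.set j true) (j+1)).2 - j
              = ((pvLineLoopA t t.length k (mask.set j true) (j+1)).2 - (j+1)) + 1 by omega]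
        rw [List.replicate_succ]
        simp
      · rw [h5, pv_drop_set mask j _ (by omega)]
      · rw [List.drop_eq_getElem_cons (by omega : j < t.length)]
        have hgd : t.getD j ' ' = t[j] := List.getD_eq_getElem t ' ' (by omega)
        rw [hgd] at hnl
        simp only [pvRunB, if_neg hnl]
        rw [h7]
        rw [show (pvLineLoopA t t.length k (mask.set j true) (j+1)).2 - j
              = ((pvLineLoopA t t.length k (mask.set j true) (j+1)).2 - (j+1)) + 1 by omega]
        rw [List.replicate_succ]
        simp
    · next hcond =>
      push_neg at hcond
      refine ⟨Nat.le_refl j, hj, hm, by simp, rfl, ?_, by simp⟩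
      by_cases hjn : j < t.length
      · exact Or.inr (hcond hjn)
      · exact Or.inl (by omega)
theorem pvBlockA_spec (t : List Char) : ∀ (fuel j : Nat) (mask : List Bool),
    t.length - j ≤ fuel → mask.length = t.length → 1 ≤ j → j ≤ t.length →
    j ≤ (pvBlockLoopA t t.length fuel mask j).2 ∧
    (pvBlockLoopA t t.length fuel mask j).2 ≤ t.length ∧
    (pvBlockLoopA t t.length fuel mask j).1.length = t.length ∧
    (pvBlockLoopA t t.length fuel mask j).1.take (pvBlockLoopA t t.length fuel mask j).2
      = mask.take j ++ List.replicate ((pvBlockLoopA t t.length fuel mask j).2 - j) true ∧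
    (pvBlockLoopA t t.length fuel mask j).1.drop (pvBlockLoopA t t.length fuel mask j).2
      = mask.drop (pvBlockLoopA t t.length fuel mask j).2 ∧
    pvRunB (t.drop j) (.block (t.getD (j - 1) ' ' == '*'))
      = List.replicate ((pvBlockLoopA t t.length fuel mask j).2 - j) true
        ++ pvRunB (t.drop (pvBlockLoopA t t.length fuel mask j).2) .normal := by
  intro fuel
  induction fuel with
  | zero =>
    intro j mask hf hm hj1 hj
    have hjn : j = t.length := by omega
    refine ⟨Nat.le_refl j, ?_, hm, ?_, rfl, ?_⟩ <;>
      simp [pvBlockLoopA, hjn, pvRunB]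
  | succ k ih =>
    intro j mask hf hm hj1 hj
    rw [pvBlockLoopA]
    split
    · next hjn =>
      have hdj : t.drop j = t[j] :: t.drop (j + 1) := List.drop_eq_getElem_cons hjn
      have hgd : t.getD j ' ' = t[j] := List.getD_eq_getElem t ' ' hjn
      split
      · next hclose =>
        obtain ⟨hstar, hslash⟩ := hclose
        refine ⟨by omega, by omega, by simp [hm], ?_, ?_, ?_⟩
        · rw [pv_take_set_succ mask j (by omega)]
          simp
        · exact pv_drop_set mask j (j + 1) (by omega)
        · rw [hdj]
          simp only [pvRunB]
          rw [if_pos ⟨by simpa [List.getD] using hstar, by rw [← hgd]; exact hslash⟩]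
          rw [show j + 1 - j = 1 by omega]
          simp
      · next hnoclose =>
        obtain ⟨h1, h2, h3, h4, h5, h6⟩ := ih (j + 1) (mask.set j true) (by omega) (by simp [hm]) (by omega) (by omega)
        refine ⟨by omega, h2, h3, ?_, ?_, ?_⟩
        · rw [h4, pv_take_set_succ mask j (by omega)]
          rw [List.append_assoc]
          congr 1
          rw [show (pvBlockLoopA t t.length k (mask.set j true) (j+1)).2 - j
                = ((pvBlockLoopA t t.length k (mask.set j true) (j+1)).2 - (j+1)) + 1 by omega]
          rw [List.replicate_succ]
          simp
        · rw [h5, pv_drop_set mask j _ (by omega)]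
        · rw [hdj]
          simp only [pvRunB]
          rw [if_neg (by
            rintro ⟨hs, hsl⟩
            simp at hs
            exact hnoclose ⟨hs, by rw [hgd]; exact hsl⟩)]
          have : t.getD (j + 1 - 1) ' ' = t[j] := by
            rw [show j + 1 - 1 = j by omega]; exact hgd
          rw [this] at h6
          rw [h6]
          rw [show (pvBlockLoopA t t.length k (mask.set j true) (j+1)).2 - j
                = ((pvBlockLoopA t t.length k (mask.set j true) (j+1)).2 - (j+1)) + 1 by omega]
          rw [List.replicate_succ]
          simp
    · next hjn =>
      have hjeq : j = t.length := by omega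
      refine ⟨Nat.le_refl j, hj, hm, by simp, rfl, ?_⟩
      rw [hjeq]
      simp [pvRunB]
theorem pv_line_normal_eq (t : List Char) (p : Nat) (hp : p ≤ t.length)
    (h : p = t.length ∨ t.getD p ' ' = '\n') :
    pvRunB (t.drop p) .normal = pvRunB (t.drop p) .line := by
  rcases h with h | h
  · subst h
    simp [pvRunB]
  · have hplt : p < t.length := by
      by_contra h'
      rw [List.getD_eq_default _ _ (by omega)] at h
      simp at h
    rw [List.drop_eq_getElem_cons hplt]
    rw [List.getD_eq_getElem t ' ' hplt] at h
    rw [h]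
    simp [pvRunB]

theorem pv_slash_step (ch : Char) (rest : List Char) (h1 : ch ≠ '/') (h2 : ch ≠ '*') :
    pvRunB (ch :: rest) .slash = false :: pvRunB (ch :: rest) .normal := by
  by_cases hq : ch = '"' ∨ ch = '\'' <;> simp [pvRunB, h1, h2, hq]

theorem pvBlockLoopA_step (t : List Char) (n fuel : Nat) (mask : List Bool) (j : Nat)
    (h : 0 < fuel) :
    pvBlockLoopA t n fuel mask j =
      if j < n then
        if t.getD (j - 1) ' ' = '*' ∧ t.getD j ' ' = '/' then (mask.set j true, j + 1)
        else pvBlockLoopA t n (fuel - 1) (mask.set j true) (j + 1)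
      else (mask, j) := by
  cases fuel with
  | zero => omega
  | succ f => simp only [pvBlockLoopA, Nat.add_sub_cancel]

theorem pvMainA (t : List Char) : ∀ (fuel i : Nat) (mask : List Bool),
    t.length - i ≤ fuel → i ≤ t.length → mask.length = t.length →
    mask.drop i = List.replicate (t.length - i) false →
    (∀ quote, pvLoopA t t.length fuel mask i "normal" quote
        = mask.take i ++ pvRunB (t.drop i) .normal) ∧
    (∀ c, pvLoopA t t.length fuel mask i "string" (some c)
        = mask.take i ++ pvRunB (t.drop i) (.str c false)) := by
  intro fuel
  induction fuel with
  | zero =>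
    intro i mask hf hi hm hd
    have hin : i = t.length := by omega
    subst hin
    constructor <;> intro _ <;>
      simp [pvLoopA, pvRunB, List.take_of_length_le (le_of_eq hm)]
  | succ k ih =>
    intro i mask hf hi hm hd
    by_cases hin : i < t.length
    case neg =>
      have hieq : i = t.length := by omega
      subst hieq
      constructor <;> intro _ <;>
        simp [pvLoopA, pvRunB, List.take_of_length_le (le_of_eq hm)]
    case pos =>
      have hgd : t.getD i ' ' = t[i] := List.getD_eq_getElem t ' ' hin
      have hdi : t.drop i = t[i] :: t.drop (i + 1) := List.drop_eq_getElem_cons hin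
      have hdropk : ∀ p, i ≤ p → mask.drop p = List.replicate (t.length - p) false := by
        intro p hp
        have := congrArg (List.drop (p - i)) hd
        rw [List.drop_drop, List.drop_replicate] at this
        rw [show i + (p - i) = p by omega] at this
        rw [this]
        congr 1
        omega
      have hmi : mask[i] = false := by
        have h1 : mask.drop i = mask[i] :: mask.drop (i + 1) :=
          List.drop_eq_getElem_cons (by omega)
        rw [hd] at h1
        rw [show t.length - i = (t.length - (i + 1)) + 1 by omega, List.replicate_succ] at h1
        exact (List.cons.injEq _ _ _ _ ▸ h1).1.symm
      have htake1 : mask.take (i + 1) = mask.take i ++ [false] := by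
        rw [List.take_add_one]
        congr 1
        rw [List.getElem?_eq_getElem (by omega)]
        simp [hmi]
      constructor
      · -- ---- state "normal" ----
        intro quote
        rw [pvLoopA, if_pos hin]
        dsimp only
        rw [if_pos rfl]
        by_cases c1 : t.getD i ' ' = '/' ∧ i + 1 < t.length ∧ t.getD (i + 1) ' ' = '/'
        · -- line comment
          rw [if_pos c1]
          obtain ⟨hc1, hc2, hc3⟩ := c1
          obtain ⟨l1, l2, l3, l4, l5, l6, l7⟩ :=
            pvLineA_spec t t.length (i + 1) (mask.set i true)
              (by omega) (by simp [hm]) (by omega)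
          have hdrop2 : (pvLineLoopA t t.length t.length (mask.set i true) (i + 1)).1.drop
              (pvLineLoopA t t.length t.length (mask.set i true) (i + 1)).2
              = List.replicate (t.length - (pvLineLoopA t t.length t.length (mask.set i true) (i + 1)).2) false := by
            rw [l5, pv_drop_set mask i _ (by omega)]
            exact hdropk _ (by omega)
          rw [(ih _ _ (by omega) l2 l3 hdrop2).1 quote]
          have hrB : pvRunB (t.drop i) .normal = true :: pvRunB (t.drop (i + 1)) .line := by
            rw [hdi, show t[i] = '/' by rw [← hgd]; exact hc1]
            rw [List.drop_eq_getElem_cons hc2,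
              show t[i + 1] = '/' by rw [← List.getD_eq_getElem t ' ' hc2]; exact hc3]
            simp [pvRunB]
          rw [hrB, l4, pv_take_set_succ mask i (by omega),
            pv_line_normal_eq t _ l2 l6, l7]
          simp
        · rw [if_neg c1]
          by_cases c2 : t.getD i ' ' = '/' ∧ i + 1 < t.length ∧ t.getD (i + 1) ' ' = '*'
          · -- block comment
            rw [if_pos c2]
            obtain ⟨hc1, hc2, hc3⟩ := c2
            rw [pvBlockLoopA_step t t.length t.length (mask.set i true) (i + 1) (by omega),
              if_pos hc2, if_neg (by
              rintro ⟨ha, -⟩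
              rw [show i + 1 - 1 = i by omega, hc1] at ha
              exact absurd ha (by decide))]
            obtain ⟨b1, b2, b3, b4, b5, b6⟩ :=
              pvBlockA_spec t (t.length - 1) (i + 2) ((mask.set i true).set (i + 1) true)
                (by omega) (by simp [hm]) (by omega) (by omega)
            have hdrop2 : (pvBlockLoopA t t.length (t.length - 1) ((mask.set i true).set (i + 1) true) (i + 2)).1.drop
                (pvBlockLoopA t t.length (t.length - 1) ((mask.set i true).set (i + 1) true) (i + 2)).2
                = List.replicate (t.length - (pvBlockLoopA t t.length (t.length - 1) ((mask.set i true).set (i + 1) true) (i + 2)).2) false := by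
              rw [b5, pv_drop_set _ (i + 1) _ (by omega), pv_drop_set mask i _ (by omega)]
              exact hdropk _ (by omega)
            rw [(ih _ _ (by omega) b2 b3 hdrop2).1 quote]
            rw [b4, pv_take_set_succ (mask.set i true) (i + 1) (by simp [hm]; omega),
              pv_take_set_succ mask i (by omega)]
            rw [show i + 2 - 1 = i + 1 by omega] at b6
            rw [show (t.getD (i + 1) ' ' == '*') = true by rw [hc3]; rfl] at b6
            have hrB : pvRunB (t.drop i) .normal
                = true :: true :: pvRunB (t.drop (i + 2)) (.block true) := by
              rw [hdi, show t[i] = '/' by rw [← hgd]; exact hc1]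
              rw [List.drop_eq_getElem_cons hc2,
                show t[i + 1] = '*' by rw [← List.getD_eq_getElem t ' ' hc2]; exact hc3]
              simp [pvRunB]
            rw [hrB, b6]
            simp
          · rw [if_neg c2]
            by_cases c3 : t.getD i ' ' = '"' ∨ t.getD i ' ' = '\''
            · -- string opens
              rw [if_pos c3]
              rw [(ih (i + 1) (mask.set i true) (by omega) (by omega) (by simp [hm]) (by
                rw [pv_drop_set mask i _ (by omega)]; exact hdropk _ (by omega))).2 (t.getD i ' ')]
              rw [pv_take_set_succ mask i (by omega), hdi, hgd]
              have hns : t[i] ≠ '/' := by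
                rw [← hgd]; rcases c3 with h | h <;> rw [h] <;> decide
              have c3' : t[i] = '"' ∨ t[i] = '\'' := by rw [← hgd]; exact c3
              simp [pvRunB, hns, c3']
            · -- plain character (possibly a lone '/')
              rw [if_neg c3]
              rw [(ih (i + 1) mask (by omega) (by omega) hm (hdropk _ (by omega))).1 quote]
              rw [htake1]
              suffices hstep : pvRunB (t.drop i) .normal = false :: pvRunB (t.drop (i + 1)) .normal by
                rw [hstep]; simp
              rw [hdi]
              by_cases hslash : t[i] = '/'
              · rw [hslash]
                simp only [pvRunB, if_pos rfl]
                rcases Nat.lt_or_ge (i + 1) t.length with hlt | hge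
                · rw [List.drop_eq_getElem_cons hlt]
                  apply pv_slash_step
                  · intro hcc
                    exact c1 ⟨by rw [hgd, hslash], hlt, by rw [List.getD_eq_getElem t ' ' hlt, hcc]⟩
                  · intro hcc
                    exact c2 ⟨by rw [hgd, hslash], hlt, by rw [List.getD_eq_getElem t ' ' hlt, hcc]⟩
                · rw [List.drop_eq_nil_of_le hge]
                  simp [pvRunB]
              · have hq : ¬(t[i] = '"' ∨ t[i] = '\'') := by
                  intro h; apply c3; rw [hgd]; exact h
                simp [pvRunB, hslash, hq]
      · -- ---- state "string" ----
        intro c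
        rw [pvLoopA, if_pos hin]
        dsimp only
        rw [if_neg (by decide : ¬(("string" : String) = "normal"))]
        by_cases cb : t.getD i ' ' = '\\'
        · rw [if_pos cb]
          by_cases hlt : i + 1 < t.length
          · rw [if_pos hlt]
            rw [(ih (i + 2) ((mask.set i true).set (i + 1) true) (by omega) (by omega)
              (by simp [hm]) (by
                rw [pv_drop_set _ (i + 1) _ (by omega), pv_drop_set mask i _ (by omega)]
                exact hdropk _ (by omega))).2 c]
            rw [pv_take_set_succ (mask.set i true) (i + 1) (by simp [hm]; omega),
              pv_take_set_succ mask i (by omega)]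
            rw [hdi, show t[i] = '\\' by rw [← hgd]; exact cb]
            rw [List.drop_eq_getElem_cons hlt]
            simp [pvRunB]
          · rw [if_neg hlt]
            rw [(ih (i + 1) (mask.set i true) (by omega) (by omega) (by simp [hm]) (by
              rw [pv_drop_set mask i _ (by omega)]; exact hdropk _ (by omega))).2 c]
            rw [pv_take_set_succ mask i (by omega)]
            have hnil : t.drop (i + 1) = [] := List.drop_eq_nil_of_le (by omega)
            rw [hdi, hnil, show t[i] = '\\' by rw [← hgd]; exact cb]
            simp [pvRunB]
        · rw [if_neg cb]
          by_cases cq : some (t.getD i ' ') = some c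
          · rw [if_pos cq]
            have hceq : t[i] = c := by rw [← hgd]; exact Option.some_injective _ cq
            rw [(ih (i + 1) (mask.set i true) (by omega) (by omega) (by simp [hm]) (by
              rw [pv_drop_set mask i _ (by omega)]; exact hdropk _ (by omega))).1 none]
            rw [pv_take_set_succ mask i (by omega), hdi, hceq]
            have hcb' : c ≠ '\\' := by
              intro h; apply cb; rw [hgd, hceq, h]
            simp [pvRunB, hcb']
          · rw [if_neg cq]
            have hcne : t[i] ≠ c := by intro h; apply cq; rw [hgd, h]
            have hcb' : t[i] ≠ '\\' := by intro h; apply cb; rw [hgd]; exact h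
            rw [(ih (i + 1) (mask.set i true) (by omega) (by omega) (by simp [hm]) (by
              rw [pv_drop_set mask i _ (by omega)]; exact hdropk _ (by omega))).2 c]
            rw [pv_take_set_succ mask i (by omega), hdi]
            simp [pvRunB, hcne, hcb']

-- ===== VERDICT (by name: the statement is the Claim_ definition above) =====
theorem compute_comment_string_mask_spec : Claim_equal_compute_comment_string_mask := by
  intro text _
  unfold Spec_compute_comment_string_mask compute_comment_string_mask compute_comment_string_mask_alt
  have h := (pvMainA text.toList text.toList.length 0 (List.replicate text.toList.length false)
    (by omega) (by omega) (by simp) (by simp)).1 none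
  simpa using h
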